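-- pv_equiv track=rewrite | github.com/sgalich/interview-preparation | algorithms/search/jump.py | search
-- ===== SOURCE A (Python) =====
-- from typing import Union, List
--
-- def search(arr: List[Union[int, float, str]], S: Union[int, float, str]) -> bool:
-- 	"""Jump search algorithm.
-- 	O(√n) for sorted array
-- 	"""
-- 	if not arr:
-- 		return False
-- 	arr = sorted(arr)    # Jump search is for sorted arrays only
-- 	step = int(len(arr)**.5)
-- 	end = step
-- 	while end <= len(arr):
-- 		if arr[end - 1] >= S:
-- 			# If number S should be in this interval =>
-- 			# do a linear search
-- 			for i in range(end - step, end):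
-- 				if arr[i] == S:
-- 					return True
-- 			return False
-- 		else:    # Jump to another interval
-- 			end += step
-- 	return False
-- ===== SOURCE B (Python) =====
-- def search(arr, S):
--     """Membership test matching the jump-search examination pattern:
--     binary-search the block boundaries instead of jumping linearly."""
--     if not arr:
--         return False
--     a = sorted(arr)
--     n = len(a)
--     step = int(n ** .5)
--     bounds = [k * step - 1 for k in range(1, n // step + 1)]
--     # first boundary whose value is >= S (binary search; boundary values are non-decreasing)
--     lo, hi = 0, len(bounds)
--     while lo < hi:
--         mid = (lo + hi) // 2
--         if a[bounds[mid]] < S: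
--             lo = mid + 1
--         else:
--             hi = mid
--     if lo == len(bounds):
--         return False
--     b = bounds[lo]
--     return S in a[b - step + 1 : b + 1]
-- ===== Notes on version B (the rewrite author's own statement) =====
-- stated objective: alternative
-- what changed: Replaces A's linear jump through the sqrt(n)-sized blocks by a precomputed list of block-boundary indices and a hand-written binary search for the first boundary value >= S, then scans only that block (same examined blocks and same tail behaviour, so the exact return value is preserved).
import Mathlib
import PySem

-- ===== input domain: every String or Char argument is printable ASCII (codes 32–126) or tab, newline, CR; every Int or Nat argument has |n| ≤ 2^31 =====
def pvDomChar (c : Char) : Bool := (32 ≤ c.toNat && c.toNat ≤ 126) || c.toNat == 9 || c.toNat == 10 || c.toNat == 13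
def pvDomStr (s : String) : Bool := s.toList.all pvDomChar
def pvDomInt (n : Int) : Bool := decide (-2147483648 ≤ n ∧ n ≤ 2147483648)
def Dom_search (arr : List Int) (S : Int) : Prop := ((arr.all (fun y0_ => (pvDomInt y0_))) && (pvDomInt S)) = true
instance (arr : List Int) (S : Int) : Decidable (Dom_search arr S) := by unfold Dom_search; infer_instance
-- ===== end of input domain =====

-- B replaces A's linear jump over √n-sized blocks by a binary search over the block
-- boundaries (same examined blocks, same tail behaviour); objective: alternative decomposition.

-- ===== PORT A =====
-- the while loop: e = end; hs makes the loop terminate (step ≥ 1 since the array is nonempty)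
def jumpLoop (a : List Int) (S : Int) (step : Nat) (hs : 0 < step) (e : Nat) : Bool :=
  if h : e ≤ a.length then
    if S ≤ PySem.List.pyGetD a ((e : Int) - 1) 0 then
      -- for i in range(end - step, end): if arr[i] == S: return True / return False
      (PySem.List.pyRange ((e : Int) - step) (e : Int) 1).any (fun i => PySem.List.pyGetD a i 0 == S)
    else
      jumpLoop a S step hs (e + step)
  else false
termination_by a.length + 1 - e
decreasing_by omega

def search (arr : List Int) (S : Int) : Bool :=
  if h : arr = [] then false
  else
    jumpLoop (PySem.List.sorted arr (fun x => x)) S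
      (Nat.sqrt (PySem.List.sorted arr (fun x => x)).length)
      (Nat.sqrt_pos.mpr (List.length_pos_iff.mpr
        (fun hnil => h ((PySem.List.sorted_eq_nil_iff arr (fun x => x) false).mp hnil))))
      (Nat.sqrt (PySem.List.sorted arr (fun x => x)).length)

-- ===== PORT B =====
-- the hand-written binary search of Source B: first index in [lo, hi) whose boundary value is ≥ S
def bsearchLoop (a : List Int) (S : Int) (bounds : List Nat) (lo hi : Nat) : Nat :=
  if h : lo < hi then
    let mid := (lo + hi) / 2
    if PySem.List.pyGetD a ((bounds.getD mid 0 : Nat) : Int) 0 < S then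
      bsearchLoop a S bounds (mid + 1) hi
    else
      bsearchLoop a S bounds lo mid
  else lo
termination_by hi - lo
decreasing_by all_goals omega

def search_alt (arr : List Int) (S : Int) : Bool :=
  if arr = [] then false
  else
    let a := PySem.List.sorted arr (fun x => x)
    let n := a.length
    let step := Nat.sqrt n
    let bounds := (List.range' 1 (n / step)).map (fun k => k * step - 1)
    let lo := bsearchLoop a S bounds 0 bounds.length
    if lo = bounds.length then false
    else
      let b := bounds.getD lo 0
      (PySem.List.slice a (some ((b : Int) - step + 1)) (some ((b : Int) + 1))).contains S

-- ===== PRECONDITION & SPEC =====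
def Spec_search (arr : List Int) (S : Int) (out : Bool) : Prop := out = search_alt arr S
instance (arr : List Int) (S : Int) (out : Bool) : Decidable (Spec_search arr S out) := by unfold Spec_search; infer_instance

-- ===== CLAIM (what is proved, stated in full; the proofs are below) =====
def Claim_equal_search : Prop := ∀ (arr : List Int) (S : Int), Dom_search arr S → Spec_search arr S (search arr S)

-- ===== LEMMAS AND PROOFS =====

-- linear scan of the block ending at index b (inclusive), as A performs it
def blockAny (a : List Int) (S : Int) (step : Nat) (b : Nat) : Bool :=
  (PySem.List.pyRange ((b : Int) + 1 - step) ((b : Int) + 1) 1).any (fun i => PySem.List.pyGetD a i 0 == S)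

-- reference linear search over the boundary list
def refFind (a : List Int) (S : Int) (step : Nat) : List Nat → Bool
  | [] => false
  | b :: bs => if S ≤ PySem.List.pyGetD a (b : Int) 0 then blockAny a S step b else refFind a S step bs

theorem jumpLoop_eq_refFind (a : List Int) (S : Int) (step : Nat) (hs : 0 < step) (k : Nat) :
    jumpLoop a S step hs ((k + 1) * step)
      = refFind a S step ((List.range' (k + 1) (a.length / step - k)).map (fun j => j * step - 1)) := by
  have key : ∀ d k, a.length / step - k ≤ d →
      jumpLoop a S step hs ((k + 1) * step)
        = refFind a S step ((List.range' (k + 1) (a.length / step - k)).map (fun j => j * step - 1)) := by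
    intro d
    induction d with
    | zero =>
      intro k hd
      have hk : a.length / step - k = 0 := by omega
      rw [hk]
      simp only [List.range'_zero, List.map_nil, refFind]
      rw [jumpLoop, dif_neg ?_]
      intro hle
      have : k + 1 ≤ a.length / step := (Nat.le_div_iff_mul_le hs).mpr hle
      omega
    | succ d ihd =>
      intro k hd
      by_cases hk : a.length / step - k = 0
      · rw [hk]
        simp only [List.range'_zero, List.map_nil, refFind]
        rw [jumpLoop, dif_neg ?_]
        intro hle
        have : k + 1 ≤ a.length / step := (Nat.le_div_iff_mul_le hs).mpr hle
        omega
      · have hklt : k < a.length / step := by omega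
        have hle : (k + 1) * step ≤ a.length := (Nat.le_div_iff_mul_le hs).mp hklt
        have hone : 1 ≤ (k + 1) * step :=
          Nat.one_le_iff_ne_zero.mpr (Nat.mul_ne_zero (by omega) (by omega))
        have hsplit : a.length / step - k = (a.length / step - (k + 1)) + 1 := by omega
        rw [hsplit, List.range'_succ, List.map_cons]
        simp only [refFind]
        have hcast : (((k + 1) * step - 1 : Nat) : Int) = (((k + 1) * step : Nat) : Int) - 1 := by
          push_cast [Nat.cast_sub hone]
          ring
        rw [jumpLoop, dif_pos hle, hcast]
        by_cases hc : S ≤ PySem.List.pyGetD a ((((k + 1) * step : Nat) : Int) - 1) 0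
        · rw [if_pos hc, if_pos hc]
          unfold blockAny
          rw [hcast]
          congr 1
          ring
        · rw [if_neg hc, if_neg hc]
          have heq : (k + 1) * step + step = (k + 1 + 1) * step := by ring
          rw [heq]
          exact ihd (k + 1) (by omega)
  exact key (a.length / step - k) k (le_refl _)

theorem findIdx_eq_of {α : Type} (p : α → Bool) (l : List α) (r : Nat) (hr : r ≤ l.length)
    (h1 : ∀ i, i < r → (hi : i < l.length) → ¬ p l[i] = true)
    (h2 : (h : r < l.length) → p l[r] = true) : l.findIdx p = r := by
  induction l generalizing r with
  | nil => simp at hr; subst hr; simp [List.findIdx_nil]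
  | cons x xs ih =>
    cases r with
    | zero =>
      have hx := h2 (by simp)
      simp at hx
      simp [List.findIdx_cons, hx]
    | succ r' =>
      have hx : ¬ p x = true := h1 0 (by omega) (by simp)
      simp only [List.findIdx_cons, Bool.eq_false_iff.mpr hx, cond_false]
      have := ih r' (by simpa using hr)
        (fun i hi hi' => h1 (i+1) (by omega) (by simpa using hi'))
        (fun h => by simpa using h2 (by simpa using h))
      omega

theorem bsearchLoop_eq_findIdx (a : List Int) (S : Int) (bounds : List Nat)
    (hmono : ∀ i j, i ≤ j → (hj : j < bounds.length) → (hi : i < bounds.length) →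
      S ≤ PySem.List.pyGetD a ((bounds[i] : Nat) : Int) 0 → S ≤ PySem.List.pyGetD a ((bounds[j] : Nat) : Int) 0)
    (lo hi : Nat) (hlo : lo ≤ hi) (hhi : hi ≤ bounds.length)
    (Hlo : ∀ i, i < lo → (hi' : i < bounds.length) → ¬ S ≤ PySem.List.pyGetD a ((bounds[i] : Nat) : Int) 0)
    (Hhi : ∀ j, hi ≤ j → (hj : j < bounds.length) → S ≤ PySem.List.pyGetD a ((bounds[j] : Nat) : Int) 0) :
    bsearchLoop a S bounds lo hi
      = bounds.findIdx (fun (b : Nat) => decide (S ≤ PySem.List.pyGetD a (b : Int) 0)) := by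
  have key : ∀ d lo hi, hi - lo ≤ d → lo ≤ hi → hi ≤ bounds.length →
      (∀ i, i < lo → (hi' : i < bounds.length) → ¬ S ≤ PySem.List.pyGetD a ((bounds[i] : Nat) : Int) 0) →
      (∀ j, hi ≤ j → (hj : j < bounds.length) → S ≤ PySem.List.pyGetD a ((bounds[j] : Nat) : Int) 0) →
      bsearchLoop a S bounds lo hi
        = bounds.findIdx (fun (b : Nat) => decide (S ≤ PySem.List.pyGetD a (b : Int) 0)) := by
    intro d
    induction d with
    | zero =>
      intro lo hi hd h1 h2 Hlo Hhi
      have : lo = hi := by omega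
      subst this
      rw [bsearchLoop, dif_neg (by omega)]
      refine (findIdx_eq_of _ _ _ h2 (fun i hi1 hi2 => by simpa using Hlo i hi1 hi2)
        (fun h => by simpa using Hhi lo (le_refl lo) h)).symm
    | succ d ihd =>
      intro lo hi hd h1 h2 Hlo Hhi
      rw [bsearchLoop]
      by_cases h : lo < hi
      · rw [dif_pos h]
        show (if PySem.List.pyGetD a ((bounds.getD ((lo + hi) / 2) 0 : Nat) : Int) 0 < S then
            bsearchLoop a S bounds ((lo + hi) / 2 + 1) hi
          else bsearchLoop a S bounds lo ((lo + hi) / 2)) = _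
        have hmidlt : (lo + hi) / 2 < bounds.length := by omega
        rw [List.getD_eq_getElem bounds 0 hmidlt]
        by_cases hc : PySem.List.pyGetD a ((bounds[(lo + hi) / 2] : Nat) : Int) 0 < S
        · rw [if_pos hc]
          refine ihd ((lo + hi) / 2 + 1) hi (by omega) (by omega) h2 ?_ Hhi
          intro i hi1 hi2 hS
          exact absurd (hmono i ((lo + hi) / 2) (by omega) hmidlt hi2 hS) (by omega)
        · rw [if_neg hc]
          refine ihd lo ((lo + hi) / 2) (by omega) (by omega) (by omega) Hlo ?_
          intro j hj1 hj2
          exact hmono ((lo + hi) / 2) j hj1 hj2 hmidlt (by omega)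
      · rw [dif_neg h]
        have : lo = hi := by omega
        subst this
        refine (findIdx_eq_of _ _ _ h2 (fun i hi1 hi2 => by simpa using Hlo i hi1 hi2)
          (fun hh => by simpa using Hhi lo (le_refl lo) hh)).symm
  exact key (hi - lo) lo hi (le_refl _) hlo hhi Hlo Hhi

theorem refFind_eq_findIdx (a : List Int) (S : Int) (step : Nat) (bs : List Nat) :
    refFind a S step bs
      = if h : bs.findIdx (fun (b : Nat) => decide (S ≤ PySem.List.pyGetD a (b : Int) 0)) < bs.length
        then blockAny a S step
          (bs[bs.findIdx (fun (b : Nat) => decide (S ≤ PySem.List.pyGetD a (b : Int) 0))])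
        else false := by
  induction bs with
  | nil => simp [refFind]
  | cons b bs ih =>
    simp only [refFind, List.findIdx_cons]
    by_cases hb : S ≤ PySem.List.pyGetD a (b : Int) 0
    · rw [if_pos hb]
      simp only [decide_eq_true hb, cond_true]
      rw [dif_pos (by simp)]
      simp
    · rw [if_neg hb]
      simp only [decide_eq_false hb, cond_false, ih]
      by_cases h : List.findIdx (fun (b : Nat) => decide (S ≤ PySem.List.pyGetD a (b : Int) 0)) bs < bs.length
      · rw [dif_pos h, dif_pos (by simp only [List.length_cons]; omega)]
        simp only [List.getElem_cons_succ]
      · rw [dif_neg h, dif_neg (by simp only [List.length_cons]; omega)]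

theorem slice_contains_eq_blockAny (a : List Int) (S : Int) (step b : Nat)
    (hb : b < a.length) (hsb : step ≤ b + 1) :
    (PySem.List.slice a (some ((b : Int) - step + 1)) (some ((b : Int) + 1))).contains S
      = blockAny a S step b := by
  have h0 : (0 : Int) ≤ (b : Int) - step + 1 := by omega
  have h1 : (0 : Int) ≤ (b : Int) + 1 := by omega
  rw [PySem.List.slice_toNat a h0 h1]
  have ht1 : ((b : Int) - step + 1).toNat = b + 1 - step := by omega
  have ht2 : ((b : Int) + 1).toNat = b + 1 := by omega
  rw [ht1, ht2]
  have hcount : b + 1 - (b + 1 - step) = step := by omega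
  rw [hcount]
  unfold blockAny
  rw [Bool.eq_iff_iff]
  constructor
  · intro hc
    have hmem : S ∈ (a.drop (b + 1 - step)).take step := List.contains_iff_mem.mp hc
    obtain ⟨k, hk, hEq⟩ := List.mem_iff_getElem.mp hmem
    have hk' : k < step ∧ b + 1 - step + k < a.length := by
      simp only [List.length_take, List.length_drop] at hk; omega
    rw [List.getElem_take, List.getElem_drop] at hEq
    apply List.any_eq_true.mpr
    refine ⟨((b + 1 - step : Nat) : Int) + k, ?_, ?_⟩
    · rw [PySem.List.mem_pyRange_one]; omega
    · simp only [beq_iff_eq]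
      rw [PySem.List.pyGetD_eq_getElem a 0 (by omega) (by omega)]
      convert hEq using 2
  · intro hc
    obtain ⟨i, hi, hEq⟩ := List.any_eq_true.mp hc
    rw [PySem.List.mem_pyRange_one] at hi
    simp only [beq_iff_eq] at hEq
    rw [PySem.List.pyGetD_eq_getElem a 0 (by omega) (by omega)] at hEq
    apply List.contains_iff_mem.mpr
    apply List.mem_iff_getElem.mpr
    refine ⟨i.toNat - (b + 1 - step), ?_, ?_⟩
    · simp only [List.length_take, List.length_drop]; omega
    · rw [List.getElem_take, List.getElem_drop]
      convert hEq using 2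
      omega

-- ===== VERDICT (by name: the statement is the Claim_ definition above) =====
theorem search_spec : Claim_equal_search := by
  intro arr S _
  unfold Spec_search
  by_cases h : arr = []
  · simp [search, search_alt, h]
  · have hanil : PySem.List.sorted arr (fun x => x) ≠ [] := by
      intro hnil
      exact h ((PySem.List.sorted_eq_nil_iff arr (fun x => x) false).mp hnil)
    have hnpos : 0 < (PySem.List.sorted arr (fun x => x)).length := List.length_pos_iff.mpr hanil
    set a := PySem.List.sorted arr (fun x => x) with ha
    set step := Nat.sqrt a.length with hstepdef
    have hstep : 0 < step := Nat.sqrt_pos.mpr hnpos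
    set bounds := (List.range' 1 (a.length / step)).map (fun k => k * step - 1) with hbounds
    have hlenb : bounds.length = a.length / step := by
      simp [hbounds, List.length_map, List.length_range']
    have hget : ∀ j, (hj : j < bounds.length) → bounds[j] = (1 + j) * step - 1 := by
      intro j hj
      simp [hbounds, List.getElem_map, List.getElem_range']
    have hblt : ∀ j, (hj : j < bounds.length) → bounds[j] < a.length := by
      intro j hj
      rw [hget j hj]
      have hjK : 1 + j ≤ a.length / step := by omega
      have hmul : (1 + j) * step ≤ a.length := (Nat.le_div_iff_mul_le hstep).mp hjK
      have hone : 1 ≤ (1 + j) * step :=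
        Nat.one_le_iff_ne_zero.mpr (Nat.mul_ne_zero (by omega) (by omega))
      omega
    have hsble : ∀ j, (hj : j < bounds.length) → step ≤ bounds[j] + 1 := by
      intro j hj
      rw [hget j hj]
      have hx : step ≤ (1 + j) * step := Nat.le_mul_of_pos_left step (by omega)
      have hone : 1 ≤ (1 + j) * step :=
        Nat.one_le_iff_ne_zero.mpr (Nat.mul_ne_zero (by omega) (by omega))
      omega
    have hmono : ∀ i j, i ≤ j → (hj : j < bounds.length) → (hi : i < bounds.length) →
        S ≤ PySem.List.pyGetD a ((bounds[i] : Nat) : Int) 0 →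
        S ≤ PySem.List.pyGetD a ((bounds[j] : Nat) : Int) 0 := by
      intro i j hij hj hi hS
      have hbi : bounds[i] < a.length := hblt i hi
      have hbj : bounds[j] < a.length := hblt j hj
      rw [PySem.List.pyGetD_eq_getElem a 0 (by omega) (by push_cast; omega)] at hS ⊢
      have hle : bounds[i] ≤ bounds[j] := by
        rw [hget i hi, hget j hj]
        have := Nat.mul_le_mul_right step (by omega : 1 + i ≤ 1 + j)
        omega
      have hmono' := PySem.List.sorted_id_getElem_mono arr
        (p := ((bounds[i] : Nat) : Int).toNat) (q := ((bounds[j] : Nat) : Int).toNat)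
        (by omega) (by rw [← ha]; omega)
      simp only [← ha] at hmono'
      omega
    have hA := jumpLoop_eq_refFind a S step hstep 0
    simp only [Nat.zero_add, one_mul, Nat.sub_zero, ← hbounds] at hA
    have hB := bsearchLoop_eq_findIdx a S bounds hmono 0 bounds.length (Nat.zero_le _)
      (le_refl _) (by intro i h1 h2; omega) (by intro j hj1 hj2; omega)
    have hR := refFind_eq_findIdx a S step bounds
    have hFle : bounds.findIdx (fun (b : Nat) => decide (S ≤ PySem.List.pyGetD a (b : Int) 0))
        ≤ bounds.length := List.findIdx_le_length
    show search arr S = search_alt arr S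
    unfold search search_alt
    rw [dif_neg h, if_neg h]
    simp only [← ha, ← hstepdef, ← hbounds]
    rw [hA, hR, hB]
    by_cases hF : bounds.findIdx (fun (b : Nat) => decide (S ≤ PySem.List.pyGetD a (b : Int) 0))
        < bounds.length
    · rw [dif_pos hF, if_neg (by omega), List.getD_eq_getElem bounds 0 hF]
      exact (slice_contains_eq_blockAny a S step _ (hblt _ hF) (hsble _ hF)).symm
    · rw [dif_neg hF, if_pos (by omega)]
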